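-- pv_equiv track=rewrite | github.com/Kevcore25/KCServersBot | kcmc/chat.py | getRCON
-- ===== SOURCE A (Python) =====
-- def getRCON(properties: list[str]):
--     password = port = None
--
--     for ln in properties:
--         try:
--             p, v = ln.split('=')
--             match p:
--                 case "rcon.port":
--                     port = int(v)
--                 case "rcon.password":
--                     password = v.rstrip()
--         except: pass
--
--     return password, port
-- ===== SOURCE B (Python) =====
-- def _int_or_none(s):
--     try:
--         return int(s)
--     except ValueError:
--         return None
--
--
-- def getRCON(properties: list[str]):
--     # Stage 1: parse every line into a (key, value) pair, dropping malformed lines.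
--     pairs = []
--     for ln in properties:
--         parts = ln.split('=')
--         if len(parts) == 2:
--             pairs.append((parts[0], parts[1]))
--     pairs.reverse()
--     # Stage 2: two independent backward searches (first valid hit from the end
--     # = last valid occurrence in the file).
--     password = next((v.rstrip() for p, v in pairs if p == "rcon.password"), None)
--     port = next((n for p, v in pairs
--                  if p == "rcon.port" and (n := _int_or_none(v)) is not None), None)
--     return password, port
-- ===== Notes on version B (the rewrite author's own statement) =====
-- stated objective: alternative
-- what changed: B first parses all lines into a list of (key,value) pairs (length test instead of try/except unpacking), reverses it, and then derives password and port by two independent searches for the first valid hit from the end, instead of A's single forward loop that mutates two variables with last-wins overwrites.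
import Mathlib
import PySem

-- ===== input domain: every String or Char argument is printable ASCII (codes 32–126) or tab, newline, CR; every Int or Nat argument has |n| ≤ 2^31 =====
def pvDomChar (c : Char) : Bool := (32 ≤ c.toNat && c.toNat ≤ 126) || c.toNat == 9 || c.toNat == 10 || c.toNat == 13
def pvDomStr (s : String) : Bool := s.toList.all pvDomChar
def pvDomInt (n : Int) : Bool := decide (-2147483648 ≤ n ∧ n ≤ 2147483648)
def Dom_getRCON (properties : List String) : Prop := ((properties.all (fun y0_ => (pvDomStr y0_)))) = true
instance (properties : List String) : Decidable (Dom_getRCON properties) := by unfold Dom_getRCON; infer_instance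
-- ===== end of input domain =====

-- B parses all lines into (key, value) pairs once and then derives password and port by two
-- independent backward searches, instead of A's single forward loop mutating two variables.

-- ===== PORT A =====
-- ln.split('=') (separator nonempty, so split? is always some)
def pvSplitEq (ln : String) : List String := (PySem.Str.split? ln "=").getD []

-- one iteration of A's forward loop: state = (password, port), later lines overwrite
def stepA (st : Option String × Option Int) (ln : String) : Option String × Option Int :=
  match pvSplitEq ln with          -- p, v = ln.split('='): exactly two parts, else exception → state kept
  | [p, v] =>
      if p = "rcon.port" then
        match PySem.Int.ofStr? v with          -- int(v); ValueError → except: pass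
        | some n => (st.1, some n)
        | none   => st
      else if p = "rcon.password" then (some (PySem.Str.rstrip v), st.2)
      else st
  | _ => st

def getRCON (properties : List String) : Option String × Option Int :=
  properties.foldl stepA (none, none)

-- ===== PORT B =====
-- stage 1: a line parses to a pair iff it splits into exactly two parts
def pvParse (ln : String) : Option (String × String) :=
  match PySem.Str.split? ln "=" with
  | some [p, v] => some (p, v)
  | _ => none

-- _int_or_none
def pvIntOrNone (s : String) : Option Int := PySem.Int.ofStr? s

def getRCON_alt (properties : List String) : Option String × Option Int :=
  let pairs := (properties.filterMap pvParse).reverse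
  let password := (pairs.find? (fun pv => pv.1 == "rcon.password")).map
                    (fun pv => PySem.Str.rstrip pv.2)
  let port := (pairs.filterMap
                 (fun pv => if pv.1 == "rcon.port" then pvIntOrNone pv.2 else none)).head?
  (password, port)

-- ===== PRECONDITION & SPEC =====
def Spec_getRCON (properties : List String) (out : Option String × Option Int) : Prop := out = getRCON_alt properties
instance (properties : List String) (out : Option String × Option Int) : Decidable (Spec_getRCON properties out) := by unfold Spec_getRCON; infer_instance

-- ===== CLAIM =====
def Claim_equal_getRCON : Prop := ∀ (properties : List String), Dom_getRCON properties → Spec_getRCON properties (getRCON properties)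

-- ===== LEMMAS AND PROOFS =====

-- stepA, expressed through B's parser
theorem stepA_parse (st : Option String × Option Int) (ln : String) :
    stepA st ln =
      match pvParse ln with
      | some (p, v) =>
          if p = "rcon.port" then
            match PySem.Int.ofStr? v with
            | some n => (st.1, some n)
            | none   => st
          else if p = "rcon.password" then (some (PySem.Str.rstrip v), st.2)
          else st
      | none => st := by
  unfold stepA pvParse pvSplitEq
  cases h : PySem.Str.split? ln "=" with
  | none => simp
  | some l =>
    cases l with
    | nil => simp
    | cons a t =>
      cases t with
      | nil => simp
      | cons b t2 => cases t2 <;> simp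

theorem stepA_parse_none (st : Option String × Option Int) (ln : String)
    (h : pvParse ln = none) : stepA st ln = st := by
  rw [stepA_parse, h]

-- main invariant: the forward fold equals B's two backward searches
theorem fold_eq_alt (l : List String) :
    l.foldl stepA (none, none) = getRCON_alt l := by
  induction l using List.reverseRecOn with
  | nil => simp [getRCON_alt]
  | append_singleton l x ih =>
    rw [List.foldl_append, List.foldl_cons, List.foldl_nil]
    unfold getRCON_alt
    rw [List.filterMap_append]
    cases hx : pvParse x with
    | none =>
      rw [stepA_parse_none _ _ hx]
      simpa [hx, getRCON_alt] using ih
    | some pv =>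
      obtain ⟨p, v⟩ := pv
      rw [stepA_parse, hx]
      simp only [List.filterMap_cons, hx, List.filterMap_nil, List.reverse_append,
        List.reverse_cons, List.reverse_nil, List.nil_append, List.cons_append,
        List.find?_cons, List.filterMap_cons]
      by_cases hp : p = "rcon.port"
      · have hp' : ¬ p = "rcon.password" := by rw [hp]; decide
        cases hi : PySem.Int.ofStr? v with
        | some n =>
          simp [hp, hi, pvIntOrNone, ih, getRCON_alt]
        | none =>
          simp [hp, hi, pvIntOrNone, ih, getRCON_alt]
      · by_cases hw : p = "rcon.password"
        · simp [hw, pvIntOrNone, ih, getRCON_alt]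
        · have hw' : (p == "rcon.password") = false := by simp [hw]
          have hp' : (p == "rcon.port") = false := by simp [hp]
          rw [if_neg hp, if_neg hw]
          simp [hw', hp', pvIntOrNone, ih, getRCON_alt]

-- ===== VERDICT =====
theorem getRCON_spec : Claim_equal_getRCON := by
  intro properties _
  show getRCON properties = getRCON_alt properties
  rw [getRCON]
  exact fold_eq_alt properties
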